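-- pv_equiv track=rewrite | github.com/hhatto/autopep8 | update_readme.py | clean_diff
-- ===== SOURCE A (Python) =====
-- def clean_diff(diff_text):
--     """Remove non-deterministic stuff from diff."""
--     clean_lines = []
--     for line in diff_text.split('\n'):
--         if line.startswith('---') or line.startswith('+++'):
--             clean_lines.append(line.split('/')[0])
--         else:
--             clean_lines.append(line)
--     return '\n'.join(clean_lines)
-- ===== SOURCE B (Python) =====
-- def clean_diff(diff_text):
--     """Remove non-deterministic stuff from diff."""
--     # Single-pass character automaton: remember the first three characters of
--     # the current line; on '/' after a '---'/'+++' prefix, drop the rest of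
--     # the line. No split/join of intermediate line lists.
--     out = []
--     head = ''
--     skip = False
--     for ch in diff_text:
--         if ch == '\n':
--             out.append(ch)
--             head = ''
--             skip = False
--         elif skip:
--             pass
--         else:
--             if len(head) < 3:
--                 head += ch
--             if ch == '/' and (head == '---' or head == '+++'):
--                 skip = True
--             else:
--                 out.append(ch)
--     return ''.join(out)
-- ===== Notes on version B (the rewrite author's own statement) =====
-- stated objective: alternative
-- what changed: Replaced the split-lines/branch-per-line/join pipeline by a single-pass character automaton that tracks the first three characters of the current line and a skip flag, emitting characters directly.
import Mathlib
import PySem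

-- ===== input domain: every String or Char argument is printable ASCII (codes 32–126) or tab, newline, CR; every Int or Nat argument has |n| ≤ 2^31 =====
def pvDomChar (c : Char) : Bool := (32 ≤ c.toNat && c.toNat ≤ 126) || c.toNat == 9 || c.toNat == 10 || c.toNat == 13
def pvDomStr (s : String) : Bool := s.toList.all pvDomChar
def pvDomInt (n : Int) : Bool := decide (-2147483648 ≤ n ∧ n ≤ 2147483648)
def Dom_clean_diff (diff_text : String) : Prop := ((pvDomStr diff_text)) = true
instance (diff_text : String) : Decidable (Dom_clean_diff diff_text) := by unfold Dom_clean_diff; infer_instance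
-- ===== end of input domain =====

-- B replaces A's split-lines/branch-per-line/join pipeline by a single-pass character automaton (alternative decomposition, same O(n) cost).

-- ===== PORT A =====
def clean_diff (diff_text : String) : String :=
  -- clean_lines: for line in diff_text.split('\n'): append the cleaned line; return '\n'.join(clean_lines)
  String.ofList (PySem.Chars.join ['\n']
    ((PySem.Chars.splitOn diff_text.toList ['\n']).foldl
      (fun acc line =>
        if PySem.Chars.startswith line ['-', '-', '-'] || PySem.Chars.startswith line ['+', '+', '+'] then
          -- line.split('/')[0]: split('/') never returns an empty list, so [0] is its head
          acc ++ [(PySem.Chars.splitOn line ['/']).headD []]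
        else
          acc ++ [line]) []))

-- ===== PORT B =====
-- loop body of Source B: state = (out, head, skip)
def cleanStep (st : List Char × List Char × Bool) (ch : Char) : List Char × List Char × Bool :=
  let out := st.1
  let head := st.2.1
  let skip := st.2.2
  if ch = '\n' then (out ++ [ch], [], false)
  else if skip then (out, head, skip)
  else
    let head' := if head.length < 3 then head ++ [ch] else head
    if ch = '/' ∧ (head' = ['-', '-', '-'] ∨ head' = ['+', '+', '+']) then (out, head', true)
    else (out ++ [ch], head', skip)

def clean_diff_alt (diff_text : String) : String :=
  String.ofList (diff_text.toList.foldl cleanStep ([], [], false)).1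

-- ===== PRECONDITION & SPEC =====
def Spec_clean_diff (diff_text : String) (out : String) : Prop := out = clean_diff_alt diff_text
instance (diff_text : String) (out : String) : Decidable (Spec_clean_diff diff_text out) := by unfold Spec_clean_diff; infer_instance

-- ===== CLAIM (what is proved, stated in full; the proofs are below) =====
def Claim_equal_clean_diff : Prop := ∀ (diff_text : String), Dom_clean_diff diff_text → Spec_clean_diff diff_text (clean_diff diff_text)

-- ===== LEMMAS AND PROOFS =====

-- reference single-character split, used to relate both ports
def mySplit (sep : Char) : List Char → List (List Char)
  | [] => [[]]
  | c :: cs => if c = sep then [] :: mySplit sep cs else (mySplit sep cs).modifyHead (c :: ·)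

-- the per-line value A computes, stated directly on the line
def fLine (l : List Char) : List Char :=
  if l.take 3 = ['-', '-', '-'] ∨ l.take 3 = ['+', '+', '+'] then l.takeWhile (· ≠ '/') else l

-- what B emits for one (newline-free) line, starting from a given head buffer
def lineEmit (head : List Char) : List Char → List Char
  | [] => []
  | c :: cs =>
    let head' := if head.length < 3 then head ++ [c] else head
    if c = '/' ∧ (head' = ['-', '-', '-'] ∨ head' = ['+', '+', '+']) then []
    else c :: lineEmit head' cs

theorem mySplit_ne_nil (sep : Char) (cs : List Char) : mySplit sep cs ≠ [] := by
  induction cs with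
  | nil => simp [mySplit]
  | cons c cs ih =>
    simp only [mySplit]
    split
    · simp
    · cases h : mySplit sep cs with
      | nil => exact absurd h ih
      | cons a t => simp [List.modifyHead]

theorem go_single (sep : Char) : ∀ (fuel : ℕ) (l cur : List Char) (acc : List (List Char)),
    l.length < fuel →
    PySem.Chars.splitOn.go [sep] fuel l cur acc
      = acc.reverse ++ (mySplit sep l).modifyHead (cur.reverse ++ ·) := by
  intro fuel
  induction fuel with
  | zero => intro l cur acc h; omega
  | succ f ih =>
    intro l cur acc h
    cases l with
    | nil =>
      simp [PySem.Chars.splitOn.go, mySplit]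
    | cons c rest =>
      by_cases hc : c = sep
      · subst hc
        rw [PySem.Chars.splitOn.go]
        have hp : [c].isPrefixOf (c :: rest) = true := by simp [List.isPrefixOf]
        rw [if_pos hp]
        simp only [List.length_cons, List.length_nil, List.drop_succ_cons, List.drop_zero]
        rw [ih rest [] (cur.reverse :: acc) (by simpa using Nat.lt_of_succ_lt_succ h)]
        cases hms : mySplit c rest with
        | nil => exact absurd hms (mySplit_ne_nil c rest)
        | cons a t => simp [mySplit, List.modifyHead, hms]
      · rw [PySem.Chars.splitOn.go]
        have hp : [sep].isPrefixOf (c :: rest) = false := by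
          simp [List.isPrefixOf]; exact fun h' => absurd h'.symm hc
        rw [if_neg (by simp [hp])]
        rw [ih rest (c :: cur) acc (by simpa using Nat.lt_of_succ_lt_succ h)]
        cases hms : mySplit sep rest with
        | nil => exact absurd hms (mySplit_ne_nil sep rest)
        | cons a t => simp [mySplit, hc, List.modifyHead, hms]

theorem splitOn_single (sep : Char) (cs : List Char) :
    PySem.Chars.splitOn cs [sep] = mySplit sep cs := by
  unfold PySem.Chars.splitOn
  rw [go_single sep (cs.length + 1) cs [] [] (by omega)]
  cases h : mySplit sep cs with
  | nil => exact absurd h (mySplit_ne_nil sep cs)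
  | cons a t => simp [List.modifyHead]

theorem headD_mySplit (sep : Char) (cs : List Char) :
    (mySplit sep cs).headD [] = cs.takeWhile (· ≠ sep) := by
  induction cs with
  | nil => simp [mySplit]
  | cons c cs ih =>
    by_cases hc : c = sep
    · subst hc; simp [mySplit, List.takeWhile_cons]
    · cases h : mySplit sep cs with
      | nil => exact absurd h (mySplit_ne_nil sep cs)
      | cons a t =>
        rw [h] at ih
        simp only [mySplit, if_neg hc, h, List.modifyHead, List.headD_cons] at *
        simp [List.takeWhile_cons, hc, ih]

theorem mySplit_no_sep (sep : Char) (l : List Char) (h : sep ∉ l) : mySplit sep l = [l] := by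
  induction l with
  | nil => simp [mySplit]
  | cons c cs ih =>
    simp at h
    simp [mySplit, Ne.symm h.1, ih h.2, List.modifyHead]

theorem mySplit_append (sep : Char) (l rest : List Char) (h : sep ∉ l) :
    mySplit sep (l ++ sep :: rest) = l :: mySplit sep rest := by
  induction l with
  | nil => simp [mySplit]
  | cons c cs ih =>
    simp at h
    cases hms : mySplit sep (cs ++ sep :: rest) with
    | nil => exact absurd hms (mySplit_ne_nil sep (cs ++ sep :: rest))
    | cons a t =>
      have := ih h.2
      rw [hms] at this
      simp only [List.cons_append, mySplit, if_neg (Ne.symm h.1), hms, List.modifyHead]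
      cases this
      rfl

-- A's loop over lines is a map
theorem foldl_if_snoc (p : List Char → Bool) (u : List Char → List Char) :
    ∀ (xs : List (List Char)) (a : List (List Char)),
    xs.foldl (fun acc l => if p l then acc ++ [u l] else acc ++ [l]) a
      = a ++ xs.map (fun l => if p l then u l else l) := by
  intro xs
  induction xs with
  | nil => simp
  | cons x xs ih => intro a; by_cases h : p x <;> simp [h, ih, List.append_assoc]

theorem cleanStep_newline (st : List Char × List Char × Bool) :
    cleanStep st '\n' = (st.1 ++ ['\n'], [], false) := by
  simp [cleanStep]

theorem foldl_line : ∀ (l : List Char), '\n' ∉ l → ∀ (out head : List Char) (skip : Bool),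
    (List.foldl cleanStep (out, head, skip) l).1
      = out ++ (if skip then [] else lineEmit head l) := by
  intro l
  induction l with
  | nil => intro _ out head skip; cases skip <;> simp [lineEmit]
  | cons c cs ih =>
    intro h out head skip
    simp at h
    obtain ⟨hc0, hcs⟩ := h
    have hc : ¬ c = '\n' := fun e => hc0 e.symm
    cases skip with
    | true =>
      rw [List.foldl_cons]
      have hstep : cleanStep (out, head, true) c = (out, head, true) := by
        simp [cleanStep, hc]
      rw [hstep]
      simpa using ih hcs out head true
    | false =>
      rw [List.foldl_cons]
      simp only [lineEmit]
      by_cases hguard : c = '/' ∧ ((if head.length < 3 then head ++ [c] else head) = ['-', '-', '-'] ∨ (if head.length < 3 then head ++ [c] else head) = ['+', '+', '+'])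
      · have hstep : cleanStep (out, head, false) c
            = (out, if head.length < 3 then head ++ [c] else head, true) := by
          simp [cleanStep, hc]
          exact ⟨hguard.1, fun hna => hguard.2.resolve_left hna⟩
        rw [hstep, if_pos hguard]
        simpa using ih hcs out _ true
      · have hstep : cleanStep (out, head, false) c
            = (out ++ [c], if head.length < 3 then head ++ [c] else head, false) := by
          simp [cleanStep, hc]
          intro h1
          exact ⟨fun hA => hguard ⟨h1, Or.inl hA⟩, fun hB => hguard ⟨h1, Or.inr hB⟩⟩
        rw [hstep, if_neg hguard]
        rw [ih hcs (out ++ [c]) _ false]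
        simp [List.append_assoc]

theorem lineEmit_pre : ∀ (l h : List Char),
    h = ['-', '-', '-'] ∨ h = ['+', '+', '+'] → lineEmit h l = l.takeWhile (· ≠ '/') := by
  intro l
  induction l with
  | nil => intro h _; simp [lineEmit]
  | cons c cs ih =>
    intro h hp
    have h3 : ¬ h.length < 3 := by rcases hp with hp | hp <;> simp [hp]
    by_cases hc : c = '/'
    · subst hc; simp [lineEmit, h3, hp, List.takeWhile_cons]
    · simp [lineEmit, h3, hc, List.takeWhile_cons, ih h hp]

theorem lineEmit_nopre : ∀ (l h : List Char), h.length ≤ 3 →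
    (h ++ l).take 3 ≠ ['-', '-', '-'] → (h ++ l).take 3 ≠ ['+', '+', '+'] →
    lineEmit h l = l := by
  intro l
  induction l with
  | nil => intro h _ _ _; simp [lineEmit]
  | cons c cs ih =>
    intro h hlen hm hp
    by_cases h3 : h.length < 3
    · have heq : (h ++ [c]) ++ cs = h ++ c :: cs := by simp
      have hguard : ¬ (c = '/' ∧ ((h ++ [c]) = ['-', '-', '-'] ∨ (h ++ [c]) = ['+', '+', '+'])) := by
        rintro ⟨rfl, hh | hh⟩ <;>
        · have hmem : ('/' : Char) ∈ h ++ ['/'] := by simp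
          rw [hh] at hmem
          simp at hmem
      simp only [lineEmit, if_pos h3, if_neg hguard]
      rw [ih (h ++ [c]) (by simp; omega) (by rwa [heq]) (by rwa [heq])]
    · have hlen3 : h.length = 3 := by omega
      have htake : (h ++ c :: cs).take 3 = h := by
        rw [← hlen3, List.take_left]
      have htake' : (h ++ cs).take 3 = h := by
        rw [← hlen3, List.take_left]
      have hm2 : h ≠ ['-', '-', '-'] := by rw [htake] at hm; exact hm
      have hp2 : h ≠ ['+', '+', '+'] := by rw [htake] at hp; exact hp
      have hguard : ¬ (c = '/' ∧ (h = ['-', '-', '-'] ∨ h = ['+', '+', '+'])) := by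
        rintro ⟨rfl, hh | hh⟩
        · exact hm2 hh
        · exact hp2 hh
      simp only [lineEmit, if_neg h3, if_neg hguard]
      rw [ih h hlen (by rw [htake']; exact hm2) (by rw [htake']; exact hp2)]

theorem lineEmit_nil (l : List Char) : lineEmit [] l = fLine l := by
  unfold fLine
  split
  · rename_i hpre
    rcases hpre with hpre | hpre
    all_goals {
      match l, hpre with
      | a :: b :: c :: rest, hpre =>
        simp only [List.take] at hpre
        obtain ⟨rfl, rfl, rfl⟩ : a = _ ∧ b = _ ∧ c = _ := by
          injection hpre with h1 h2; injection h2 with h2 h3; injection h3 with h3 _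
          exact ⟨h1, h2, h3⟩
        simp only [lineEmit, List.takeWhile_cons]
        rw [lineEmit_pre rest _ (by simp)]
        simp [show ('-' : Char) ≠ '/' from by decide, show ('+' : Char) ≠ '/' from by decide]
    }
  · rename_i hpre
    rw [not_or] at hpre
    exact lineEmit_nopre l [] (by simp) (by simpa using hpre.1) (by simpa using hpre.2)

theorem foldl_clean : ∀ (n : ℕ) (cs : List Char), cs.length ≤ n → ∀ (out : List Char),
    (List.foldl cleanStep (out, [], false) cs).1
      = out ++ PySem.Chars.join ['\n'] ((mySplit '\n' cs).map fLine) := by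
  intro n
  induction n with
  | zero =>
    intro cs hcs out
    have : cs = [] := by cases cs <;> simp_all
    subst this
    simp [mySplit, PySem.Chars.join_singleton, fLine]
  | succ n ih =>
    intro cs hcs out
    by_cases hmem : '\n' ∈ cs
    · set l := cs.takeWhile (· ≠ '\n') with hl
      have hnl : '\n' ∉ l := by
        intro h
        have := List.mem_takeWhile_imp h
        simp at this
      have hdrop : cs.dropWhile (· ≠ '\n') ≠ [] := by
        intro h
        rw [List.dropWhile_eq_nil_iff] at h
        simpa using h '\n' hmem
      obtain ⟨d, tl, hd⟩ := List.exists_cons_of_ne_nil hdrop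
      have hdn : d = '\n' := by
        have hh := List.head_dropWhile_not (p := fun c : Char => c ≠ '\n') hdrop
        simp only [hd, List.head_cons] at hh
        simpa using hh
      subst hdn
      have hsplit : cs = l ++ '\n' :: tl := by
        conv_lhs => rw [← List.takeWhile_append_dropWhile (p := fun c => c ≠ '\n') (l := cs)]
        rw [hd]
      have hlen : tl.length ≤ n := by
        have : cs.length = l.length + tl.length + 1 := by rw [hsplit]; simp; omega
        omega
      rw [hsplit, List.foldl_append]
      simp only [List.foldl_cons]
      rw [cleanStep_newline]
      rw [ih tl hlen _]
      rw [foldl_line l hnl out [] false]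
      simp only [Bool.false_eq_true, if_false]
      rw [mySplit_append _ _ _ hnl]
      cases hms : mySplit '\n' tl with
      | nil => exact absurd hms (mySplit_ne_nil _ _)
      | cons a t =>
        simp [List.map_cons, PySem.Chars.join_cons_cons, lineEmit_nil, List.append_assoc]
    · rw [mySplit_no_sep _ _ hmem]
      rw [foldl_line cs hmem out [] false]
      simp [PySem.Chars.join_singleton, lineEmit_nil]

theorem fLine_eq (l : List Char) :
    (if PySem.Chars.startswith l ['-', '-', '-'] || PySem.Chars.startswith l ['+', '+', '+'] then
      (PySem.Chars.splitOn l ['/']).headD []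
    else l) = fLine l := by
  have hsw : ∀ (p : List Char), PySem.Chars.startswith l p = true ↔ l.take p.length = p := by
    intro p
    rw [PySem.Chars.startswith, List.isPrefixOf_iff_prefix, List.prefix_iff_eq_take]
    exact ⟨fun h => h.symm, fun h => h.symm⟩
  rw [splitOn_single, headD_mySplit]
  unfold fLine
  by_cases hpre : l.take 3 = ['-', '-', '-'] ∨ l.take 3 = ['+', '+', '+']
  · have hb : (PySem.Chars.startswith l ['-', '-', '-'] || PySem.Chars.startswith l ['+', '+', '+']) = true := by
      rcases hpre with h | h
      · simp [(hsw ['-', '-', '-']).2 h]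
      · simp [(hsw ['+', '+', '+']).2 h]
    rw [if_pos hb, if_pos hpre]
  · have hb : (PySem.Chars.startswith l ['-', '-', '-'] || PySem.Chars.startswith l ['+', '+', '+']) = false := by
      rw [not_or] at hpre
      simp only [Bool.or_eq_false_iff]
      constructor
      · cases h : PySem.Chars.startswith l ['-', '-', '-']
        · rfl
        · exact absurd ((hsw _).1 h) hpre.1
      · cases h : PySem.Chars.startswith l ['+', '+', '+']
        · rfl
        · exact absurd ((hsw _).1 h) hpre.2
    rw [if_neg (by simp [hb]), if_neg hpre]

-- ===== VERDICT (by name: the statement is the Claim_ definition above) =====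
theorem clean_diff_spec : Claim_equal_clean_diff := by
  intro s _
  unfold Spec_clean_diff clean_diff clean_diff_alt
  rw [foldl_clean s.toList.length s.toList le_rfl []]
  rw [splitOn_single]
  rw [foldl_if_snoc]
  simp only [List.nil_append, fLine_eq]
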